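-- pv_equiv track=rewrite | github.com/renmu2017/Segmentor | com/zhanghao/util/data_process.py | featContext
-- ===== SOURCE A (Python) =====
-- def featContext(sentence, word2idx = '', context = 7):
--     predict_word_num = []
--     for w in sentence:
--         if w in word2idx:
--             predict_word_num.append(word2idx[w])
--         else:
--             predict_word_num.append(word2idx[u'U'])
--     num = len(predict_word_num)
--     pad = int((context - 1) * 0.5)
--     for i in range(pad):
--         predict_word_num.insert(0, word2idx[u'P'])
--         predict_word_num.append(word2idx[u'P'])
--     train_x = []
--     for i in range(num):
--         train_x.append(predict_word_num[i:i+context])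
--     return train_x
-- ===== SOURCE B (Python) =====
-- def featContext(sentence, word2idx = '', context = 7):
--     # Build each context window directly by index arithmetic over a virtual
--     # padded sequence, instead of materializing a padded list and slicing it.
--     idx = [word2idx[w] if w in word2idx else word2idx['U'] for w in sentence]
--     n = len(idx)
--     pad = (context - 1) // 2
--     total = n + 2 * pad
--     return [[word2idx['P'] if j < pad or j >= pad + n else idx[j - pad]
--              for j in range(i, min(i + context, total))]
--             for i in range(n)]
-- ===== Notes on version B (the rewrite author's own statement) =====
-- stated objective: alternative
-- what changed: B builds each window directly by index arithmetic over a virtual padded sequence (per-cell pad/word resolution) instead of materializing the padded list with insert/append and slicing one window per position; Pre_ excludes the inputs where A raises KeyError (unresolvable word, or context >= 3 with 'P' missing) and negative context, where A's windows arise from negative-slice wraparound, an artefact of the slicing implementation.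
-- outside the precondition, e.g. on featContext(['a', 'b'], {'a': 1, 'b': 2, 'U': 0, 'P': 9}, -1): A returns [[1], []], B returns [[], []]
import Mathlib
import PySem

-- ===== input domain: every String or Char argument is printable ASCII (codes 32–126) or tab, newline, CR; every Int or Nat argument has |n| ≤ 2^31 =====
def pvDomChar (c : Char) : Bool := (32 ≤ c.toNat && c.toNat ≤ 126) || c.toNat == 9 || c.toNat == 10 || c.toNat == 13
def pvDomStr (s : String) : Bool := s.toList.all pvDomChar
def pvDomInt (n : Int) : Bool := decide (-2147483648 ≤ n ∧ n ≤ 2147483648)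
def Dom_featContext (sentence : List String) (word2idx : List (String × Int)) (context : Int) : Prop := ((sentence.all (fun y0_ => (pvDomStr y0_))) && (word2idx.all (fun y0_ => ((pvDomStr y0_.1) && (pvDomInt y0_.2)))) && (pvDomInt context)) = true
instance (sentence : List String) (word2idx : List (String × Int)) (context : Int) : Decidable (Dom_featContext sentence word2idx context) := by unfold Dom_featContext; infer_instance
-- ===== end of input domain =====

-- B builds each context window directly by index arithmetic over a virtual padded sequence
-- instead of materializing the padded list with insert/append and slicing it (objective: alternative).

-- ===== PORT A =====
def featContext (sentence : List String) (word2idx : List (String × Int)) (context : Int) : List (List Int) :=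
  let pwn : List Int := sentence.foldl (fun acc w =>
      if (word2idx.lookup w).isSome then acc ++ [(word2idx.lookup w).getD 0]
      else acc ++ [(word2idx.lookup "U").getD 0]) []
  let num : Int := pwn.length
  -- int((context - 1) * 0.5): (context-1)*0.5 is an exact float for |context| ≤ 2^31
  -- and int() truncates toward zero, i.e. Int.tdiv (exact on the stated domain)
  let pad : Int := Int.tdiv (context - 1) 2
  let pwn2 : List Int := (PySem.List.pyRange 0 pad 1).foldl
      (fun acc _ => [(word2idx.lookup "P").getD 0] ++ acc ++ [(word2idx.lookup "P").getD 0]) pwn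
  (PySem.List.pyRange 0 num 1).foldl
      (fun tx i => tx ++ [PySem.List.slice pwn2 (some i) (some (i + context))]) []

-- ===== PORT B =====
def featContext_alt (sentence : List String) (word2idx : List (String × Int)) (context : Int) : List (List Int) :=
  let idx : List Int := sentence.map (fun w =>
      if (word2idx.lookup w).isSome then (word2idx.lookup w).getD 0
      else (word2idx.lookup "U").getD 0)
  let n : Int := idx.length
  let pad : Int := PySem.Int.floordiv (context - 1) 2
  let total : Int := n + 2 * pad
  (PySem.List.pyRange 0 n 1).map (fun i =>
    (PySem.List.pyRange i (min (i + context) total) 1).map (fun j =>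
      if j < pad ∨ pad + n ≤ j then (word2idx.lookup "P").getD 0
      else idx.getD (j - pad).toNat 0))

-- ===== PRECONDITION & SPEC =====
-- Pre_ excludes the inputs where A raises KeyError (a sentence word unresolvable because 'U' is
-- missing, or context ≥ 3 with 'P' missing) and negative context, where A's windows arise from
-- negative-slice wraparound, an artefact of the slicing implementation.
def Pre_featContext (sentence : List String) (word2idx : List (String × Int)) (context : Int) : Prop :=
  (∀ w ∈ sentence, (word2idx.lookup w).isSome = true ∨ (word2idx.lookup "U").isSome = true) ∧
  (3 ≤ context → (word2idx.lookup "P").isSome = true) ∧ 0 ≤ context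
instance (sentence : List String) (word2idx : List (String × Int)) (context : Int) : Decidable (Pre_featContext sentence word2idx context) := by unfold Pre_featContext; infer_instance
def pvWitness_featContext : List String × (List (String × Int)) × Int :=
  (["a", "b"], [("a", 1), ("U", 2), ("P", 0)], 7)
def Spec_featContext (sentence : List String) (word2idx : List (String × Int)) (context : Int) (out : List (List Int)) : Prop := out = featContext_alt sentence word2idx context
instance (sentence : List String) (word2idx : List (String × Int)) (context : Int) (out : List (List Int)) : Decidable (Spec_featContext sentence word2idx context out) := by unfold Spec_featContext; infer_instance

-- ===== CLAIM (what is proved, stated in full; the proofs are below) =====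
def Claim_equal_featContext : Prop := ∀ (sentence : List String) (word2idx : List (String × Int)) (context : Int), Dom_featContext sentence word2idx context → Pre_featContext sentence word2idx context → Spec_featContext sentence word2idx context (featContext sentence word2idx context)

-- ===== LEMMAS AND PROOFS =====

-- A's pad (truncating division) equals B's pad (floor division) for context ≥ 1.
lemma pad_eq (c : Int) (h : 1 ≤ c) : Int.tdiv (c - 1) 2 = PySem.Int.floordiv (c - 1) 2 := by
  rw [PySem.Int.floordiv_eq_ediv_of_pos (by omega), Int.tdiv_eq_ediv_of_nonneg (by omega)]

-- the padding loop prepends and appends one element per iteration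
lemma foldPad (p : Int) (l : List Int) (xs : List Int) :
    l.foldl (fun acc _ => [p] ++ acc ++ [p]) xs =
      List.replicate l.length p ++ xs ++ List.replicate l.length p := by
  induction l generalizing xs with
  | nil => simp
  | cons a l ih =>
      have h : ∀ (Y : List Int), List.replicate l.length p ++ (p :: Y)
          = p :: (List.replicate l.length p ++ Y) := by
        intro Y
        rw [← List.singleton_append, ← List.append_assoc, ← List.replicate_succ',
          List.replicate_succ, List.cons_append]
      rw [List.foldl_cons, ih]
      simp only [List.length_cons, List.replicate_succ, List.append_assoc,
        List.cons_append, List.nil_append, h]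

-- the window at position i of the padded list, as B computes it
lemma window_eq (idxs : List Int) (p : Int) (k : Nat) (c i : Int)
    (hc : 1 ≤ c) (hi0 : 0 ≤ i) (hin : i < (idxs.length : Int)) :
    PySem.List.slice (List.replicate k p ++ idxs ++ List.replicate k p) (some i) (some (i + c)) =
      (PySem.List.pyRange i (min (i + c) ((idxs.length : Int) + 2 * (k : Int))) 1).map
        (fun j => if j < (k : Int) ∨ (k : Int) + (idxs.length : Int) ≤ j then p
                  else idxs.getD (j - (k : Int)).toNat 0) := by
  set n := idxs.length with hn
  have hL : (List.replicate k p ++ idxs ++ List.replicate k p).length = k + n + k := by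
    simp; omega
  set s : Int := min (i + c) ((n : Int) + 2 * k) with hs
  have hcA : PySem.List.clampIdx (k + n + k) i = i.toNat := by
    simp only [PySem.List.clampIdx]
    split_ifs <;> omega
  have hcB : PySem.List.clampIdx (k + n + k) (i + c) = s.toNat := by
    simp only [PySem.List.clampIdx, hs]
    split_ifs <;> omega
  have hslice : PySem.List.slice (List.replicate k p ++ idxs ++ List.replicate k p) (some i) (some (i + c))
      = List.take (s.toNat - i.toNat) (List.drop i.toNat (List.replicate k p ++ idxs ++ List.replicate k p)) := by
    simp only [PySem.List.slice, hL, hcA, hcB]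
  rw [hslice]
  apply List.ext_getElem
  · simp only [List.length_take, List.length_drop, List.length_map,
      PySem.List.length_pyRange_one, hL]
    omega
  · intro m h1 h2
    simp only [List.length_take, List.length_drop, hL] at h1
    rw [List.getElem_take, List.getElem_drop]
    rw [List.getElem_map, PySem.List.getElem_pyRange_one]
    have hq : i + (m : Int) = ((i.toNat + m : Nat) : Int) := by omega
    by_cases hq1 : i.toNat + m < k
    · rw [List.getElem_append_left (by simp; omega), List.getElem_append_left (by simpa using hq1),
        List.getElem_replicate]
      rw [if_pos (by left; omega)]
    · by_cases hq2 : i.toNat + m < k + n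
      · rw [List.getElem_append_left (by simp; omega), List.getElem_append_right (by simpa using hq1)]
        simp only [List.length_replicate]
        rw [if_neg (by push Not; constructor <;> omega)]
        have h3 : (i + (m : Int) - (k : Int)).toNat = i.toNat + m - k := by omega
        rw [h3, List.getD_eq_getElem _ _ (by omega)]
      · rw [List.getElem_append_right (by simp; omega)]
        rw [List.getElem_replicate]
        rw [if_pos (by right; omega)]

-- ===== VERDICT (by name: the statement is the Claim_ definition above) =====
-- an empty slice and an empty range
lemma slice_self (xs : List Int) (i : Int) :
    PySem.List.slice xs (some i) (some i) = [] := by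
  simp [PySem.List.slice]

lemma pyRange_one_nil (a b : Int) (h : b ≤ a) : PySem.List.pyRange a b 1 = [] := by
  apply List.eq_nil_of_length_eq_zero
  rw [PySem.List.length_pyRange_one]
  omega

theorem featContext_spec : Claim_equal_featContext := by
  intro sentence word2idx context _hd hpre
  obtain ⟨-, -, hc0⟩ := hpre
  unfold Spec_featContext featContext featContext_alt
  dsimp only
  have hA1 : List.foldl
      (fun acc w =>
        if (List.lookup w word2idx).isSome = true then acc ++ [(List.lookup w word2idx).getD 0]
        else acc ++ [(List.lookup "U" word2idx).getD 0]) [] sentence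
      = List.map (fun w =>
        if (List.lookup w word2idx).isSome = true then (List.lookup w word2idx).getD 0
        else (List.lookup "U" word2idx).getD 0) sentence := by
    have hfun : (fun (acc : List Int) w =>
        if (List.lookup w word2idx).isSome = true then acc ++ [(List.lookup w word2idx).getD 0]
        else acc ++ [(List.lookup "U" word2idx).getD 0])
        = fun acc w => acc ++ [if (List.lookup w word2idx).isSome = true then (List.lookup w word2idx).getD 0
            else (List.lookup "U" word2idx).getD 0] := by
      funext acc w; split_ifs <;> rfl
    rw [hfun, PySem.List.foldl_append_singleton_eq_map, List.nil_append]
  rw [hA1]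
  rcases (by omega : context = 0 ∨ 1 ≤ context) with hz | hc
  · -- context = 0: every window of A is the empty slice, every range of B is empty
    subst hz
    have hpadA : Int.tdiv (0 - 1) 2 = 0 := by decide
    rw [hpadA]
    have : PySem.List.pyRange 0 0 1 = [] := pyRange_one_nil _ _ le_rfl
    rw [this, List.foldl_nil]
    rw [PySem.List.foldl_append_singleton_eq_map, List.nil_append]
    apply List.map_congr_left
    intro i hi
    rw [PySem.List.mem_pyRange_one] at hi
    rw [Int.add_zero, slice_self]
    rw [pyRange_one_nil _ _ (min_le_left _ _)]
    rfl
  rw [foldPad ((List.lookup "P" word2idx).getD 0) (PySem.List.pyRange 0 ((context - 1).tdiv 2))]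
  rw [PySem.List.length_pyRange_one, Int.sub_zero]
  rw [PySem.List.foldl_append_singleton_eq_map, List.nil_append]
  rw [pad_eq _ hc]
  have hpadnn : 0 ≤ PySem.Int.floordiv (context - 1) 2 := by
    rw [PySem.Int.floordiv_eq_ediv_of_pos (by omega)]
    exact Int.ediv_nonneg (by omega) (by omega)
  obtain ⟨k, hk⟩ : ∃ k : Nat, PySem.Int.floordiv (context - 1) 2 = (k : Int) :=
    ⟨_, (Int.toNat_of_nonneg hpadnn).symm⟩
  rw [hk]
  simp only [Int.toNat_natCast]
  apply List.map_congr_left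
  intro i hi
  rw [PySem.List.mem_pyRange_one] at hi
  rw [window_eq _ _ _ _ _ hc hi.1 (by exact_mod_cast hi.2)]
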